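-- pv_equiv track=rewrite | github.com/pentalpha/rna_gatherer_2020 | analysis/parse_fastqc.py | get_module
-- ===== SOURCE A (Python) =====
-- def get_module(lines, module_key):
--     mod_lines = []
--     inside = False
--     for line in lines:
--         if not inside:
--             if module_key in line:
--                 inside = True
--         else:
--             if "END_MODULE" in line:
--                 break
--             elif not line.startswith('#'):
--                 mod_lines.append(line)
--     return mod_lines
-- ===== SOURCE B (Python) =====
-- def get_module(lines, module_key):
--     # Locate the marker line; without it the module is empty.
--     start = next((i for i, l in enumerate(lines) if module_key in l), None)
--     if start is None:
--         return []
--     body = lines[start + 1:]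
--     # Locate the end marker (or take everything) and drop comment lines.
--     end = next((i for i, l in enumerate(body) if "END_MODULE" in l), len(body))
--     return [l for l in body[:end] if not l.startswith('#')]
-- ===== Notes on version B (the rewrite author's own statement) =====
-- stated objective: alternative
-- what changed: Instead of a stateful sequential scan with an 'inside' flag, B computes the marker and END_MODULE positions by index search, extracts the block by slicing, and removes comment lines with a filter.
import Mathlib
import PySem

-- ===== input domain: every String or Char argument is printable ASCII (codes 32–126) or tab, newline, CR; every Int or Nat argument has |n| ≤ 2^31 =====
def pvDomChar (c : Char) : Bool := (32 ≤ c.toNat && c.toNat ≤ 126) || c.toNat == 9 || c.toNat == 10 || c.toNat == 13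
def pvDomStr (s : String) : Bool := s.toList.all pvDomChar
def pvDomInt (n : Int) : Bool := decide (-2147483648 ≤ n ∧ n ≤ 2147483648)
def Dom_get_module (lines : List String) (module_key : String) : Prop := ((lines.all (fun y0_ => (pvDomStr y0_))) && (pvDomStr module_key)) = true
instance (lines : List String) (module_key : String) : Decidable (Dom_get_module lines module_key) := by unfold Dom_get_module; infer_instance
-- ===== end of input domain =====

-- B replaces A's stateful flag-driven scan by index search + slicing + a comment filter (objective: alternative).

-- ===== PORT A =====
-- A's loop: state = (inside flag, accumulated lines); break returns the accumulator.
def getModGoA (module_key : String) : List String → Bool → List String → List String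
  | [], _, acc => acc
  | l :: rest, inside, acc =>
    if !inside then
      if PySem.Str.isIn module_key l then getModGoA module_key rest true acc
      else getModGoA module_key rest false acc
    else
      if PySem.Str.isIn "END_MODULE" l then acc
      else if PySem.Str.startswith l "#" then getModGoA module_key rest true acc
      else getModGoA module_key rest true (acc ++ [l])

def get_module (lines : List String) (module_key : String) : List String :=
  getModGoA module_key lines false []

-- ===== PORT B =====
-- Source B: find the marker index, slice off the body, find END_MODULE (or take all), filter out '#' lines.
def get_module_alt (lines : List String) (module_key : String) : List String :=
  match lines.findIdx? (fun l => PySem.Str.isIn module_key l) with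
  | none => []
  | some start =>
    let body := lines.drop (start + 1)   -- lines[start+1:], start ≥ 0 so drop is exact
    let upto :=
      match body.findIdx? (fun l => PySem.Str.isIn "END_MODULE" l) with
      | none => body                      -- body[:len(body)]
      | some e => body.take e             -- body[:e]
    upto.filter (fun l => !PySem.Str.startswith l "#")

-- ===== PRECONDITION & SPEC =====
def Spec_get_module (lines : List String) (module_key : String) (out : List String) : Prop := out = get_module_alt lines module_key
instance (lines : List String) (module_key : String) (out : List String) : Decidable (Spec_get_module lines module_key out) := by unfold Spec_get_module; infer_instance

-- ===== CLAIM =====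
def Claim_equal_get_module : Prop := ∀ (lines : List String) (module_key : String), Dom_get_module lines module_key → Spec_get_module lines module_key (get_module lines module_key)

-- ===== LEMMAS AND PROOFS =====

-- A's inside phase equals acc ++ (take-until-END_MODULE, filtered of '#' lines).
theorem getModGoA_true_eq (module_key : String) (ls : List String) (acc : List String) :
    getModGoA module_key ls true acc =
      acc ++ (match ls.findIdx? (fun l => PySem.Str.isIn "END_MODULE" l) with
              | none => ls
              | some e => ls.take e).filter (fun l => !PySem.Str.startswith l "#") := by
  induction ls generalizing acc with
  | nil => simp [getModGoA, List.findIdx?, List.findIdx?.go]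
  | cons l rest ih =>
    simp only [getModGoA, List.findIdx?_cons, PySem.Str.isIn_eq, PySem.Str.startswith_eq,
      Bool.not_true, Bool.false_eq_true, if_false] at ih ⊢
    by_cases h1 : PySem.Chars.isIn "END_MODULE".toList l.toList = true
    · rw [if_pos h1, if_pos h1]
      simp
    · rw [if_neg h1, if_neg h1]
      by_cases h2 : PySem.Chars.startswith l.toList "#".toList = true
      · rw [if_pos h2, ih acc]
        cases hf : rest.findIdx? (fun l => PySem.Chars.isIn "END_MODULE".toList l.toList) with
        | none => simp only [Option.map_none]; rw [List.filter_cons_of_neg (by simpa using h2)]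
        | some e => simp only [Option.map_some]; rw [List.take_succ_cons, List.filter_cons_of_neg (by simpa using h2)]
      · rw [if_neg h2, ih (acc ++ [l])]
        cases hf : rest.findIdx? (fun l => PySem.Chars.isIn "END_MODULE".toList l.toList) with
        | none => simp only [Option.map_none]; rw [List.filter_cons_of_pos (by simpa using h2), List.append_assoc, List.singleton_append]
        | some e => simp only [Option.map_some]; rw [List.take_succ_cons, List.filter_cons_of_pos (by simpa using h2), List.append_assoc, List.singleton_append]
-- A's outside phase: no marker ⇒ acc; marker at i ⇒ continue inside on drop (i+1).
theorem getModGoA_false_none (module_key : String) (ls : List String) (acc : List String)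
    (h : ls.findIdx? (fun l => PySem.Str.isIn module_key l) = none) :
    getModGoA module_key ls false acc = acc := by
  simp only [PySem.Str.isIn_eq] at h
  induction ls with
  | nil => rfl
  | cons l rest ih =>
    rw [List.findIdx?_cons] at h
    by_cases hl : PySem.Chars.isIn module_key.toList l.toList = true
    · rw [if_pos hl] at h; exact absurd h (by simp)
    · rw [if_neg hl, Option.map_eq_none_iff] at h
      simp only [getModGoA, Bool.not_false, if_true, PySem.Str.isIn_eq]
      rw [if_neg hl]
      exact ih h

theorem getModGoA_false_some (module_key : String) (ls : List String) (acc : List String) (i : Nat)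
    (h : ls.findIdx? (fun l => PySem.Str.isIn module_key l) = some i) :
    getModGoA module_key ls false acc = getModGoA module_key (ls.drop (i + 1)) true acc := by
  simp only [PySem.Str.isIn_eq] at h
  induction ls generalizing i with
  | nil => simp [List.findIdx?, List.findIdx?.go] at h
  | cons l rest ih =>
    rw [List.findIdx?_cons] at h
    by_cases hl : PySem.Chars.isIn module_key.toList l.toList = true
    · rw [if_pos hl, Option.some.injEq] at h
      subst h
      simp only [getModGoA, List.drop_succ_cons, List.drop_zero, Bool.not_false, if_true,
        PySem.Str.isIn_eq]
      rw [if_pos hl]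
    · rw [if_neg hl] at h
      cases hrest : rest.findIdx? (fun l => PySem.Chars.isIn module_key.toList l.toList) with
      | none => rw [hrest] at h; exact absurd h (by simp)
      | some j =>
        rw [hrest, Option.map_some, Option.some.injEq] at h
        subst h
        simp only [getModGoA, List.drop_succ_cons, Bool.not_false, if_true, PySem.Str.isIn_eq]
        rw [if_neg hl]
        exact ih j hrest

-- ===== VERDICT =====
theorem get_module_spec : Claim_equal_get_module := by
  intro lines module_key _
  unfold Spec_get_module get_module get_module_alt
  cases h : lines.findIdx? (fun l => PySem.Str.isIn module_key l) with
  | none => exact getModGoA_false_none module_key lines [] h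
  | some i =>
    rw [getModGoA_false_some module_key lines [] i h, getModGoA_true_eq]
    simp
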